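-- pv_equiv track=rewrite | github.com/Slin58/naolympics | nao/tictactoe_tactic/tictactoeTacticTest.py | set_point_o
-- ===== SOURCE A (Python) =====
-- def set_point_o(field, place):
--     counter = 0
--     for i in range(0, len(field)):
--         for j in range(0, len(field)):
--             if counter == place:
--                 field[i][j] = 'o'
--             counter += 1
--
--     return field
-- ===== SOURCE B (Python) =====
-- def set_point_o(field, place):
--     n = len(field)
--     if 0 <= place < n * n:
--         field[place // n][place % n] = 'o'
--     return field
-- ===== Notes on version B (the rewrite author's own statement) =====
-- stated objective: simpler
-- what changed: Replaces the nested counter loops over the whole grid with a single bounds check and direct divmod indexing field[place//n][place%n].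
import Mathlib
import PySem

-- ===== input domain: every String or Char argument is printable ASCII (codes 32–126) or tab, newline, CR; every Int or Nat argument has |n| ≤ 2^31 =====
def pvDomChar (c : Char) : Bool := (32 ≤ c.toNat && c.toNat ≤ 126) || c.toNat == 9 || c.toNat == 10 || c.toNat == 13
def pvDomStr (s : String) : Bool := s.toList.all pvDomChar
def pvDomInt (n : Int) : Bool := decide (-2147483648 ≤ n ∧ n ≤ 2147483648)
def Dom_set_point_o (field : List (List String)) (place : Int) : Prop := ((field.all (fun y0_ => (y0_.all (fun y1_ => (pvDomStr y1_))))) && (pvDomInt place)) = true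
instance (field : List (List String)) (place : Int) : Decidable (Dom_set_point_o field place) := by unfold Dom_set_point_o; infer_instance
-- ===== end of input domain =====

-- B replaces A's nested counter loops by a single bounds check and direct divmod
-- indexing (simpler); the Python A mutates `field` in place — the equivalence
-- proved here is about the RETURN value only.

-- ===== PORT A =====
-- nested `for i / for j` loops with an integer counter, carried as a foldl state
def set_point_o (field : List (List String)) (place : Int) : List (List String) :=
  let n := field.length
  ((List.range n).foldl (fun st i =>
      (List.range n).foldl (fun st j =>
          ((if st.2 = place then st.1.set i ((st.1.getD i []).set j "o") else st.1), st.2 + 1))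
        st)
    (field, (0 : Int))).1

-- ===== PORT B =====
def set_point_o_alt (field : List (List String)) (place : Int) : List (List String) :=
  let n : Int := field.length
  if 0 ≤ place ∧ place < n * n then
    field.set (PySem.Int.floordiv place n).toNat
      ((field.getD (PySem.Int.floordiv place n).toNat []).set (PySem.Int.mod place n).toNat "o")
  else field

-- ===== PRECONDITION & SPEC =====
-- Pre_ excludes exactly the inputs where the Python A raises IndexError: 0 ≤ place < n²
-- but row place//n is shorter than place%n+1 (my Python B raises the same IndexError there).
def Pre_set_point_o (field : List (List String)) (place : Int) : Prop :=
  place < 0 ∨ (field.length : Int) * field.length ≤ place ∨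
    PySem.Int.mod place (field.length : Int) <
      ((field.getD (PySem.Int.floordiv place (field.length : Int)).toNat []).length : Int)
instance (field : List (List String)) (place : Int) : Decidable (Pre_set_point_o field place) := by
  unfold Pre_set_point_o; infer_instance
def pvWitness_set_point_o : List (List String) × Int := ([["x", "x"], ["x", "x"]], 2)
def Spec_set_point_o (field : List (List String)) (place : Int) (out : List (List String)) : Prop := out = set_point_o_alt field place
instance (field : List (List String)) (place : Int) (out : List (List String)) : Decidable (Spec_set_point_o field place out) := by unfold Spec_set_point_o; infer_instance

-- ===== CLAIM (what is proved, stated in full; the proofs are below) =====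
def Claim_equal_set_point_o : Prop := ∀ (field : List (List String)) (place : Int), Dom_set_point_o field place → Pre_set_point_o field place → Spec_set_point_o field place (set_point_o field place)

-- ===== LEMMAS AND PROOFS =====

-- the inner `for j` loop: fires at most once, at j = place - c, if place falls in [c, c+n)
theorem inner_fold (place : Int) (i n : Nat) (F : List (List String)) (c : Int) :
    (List.range n).foldl (fun st j =>
        ((if st.2 = place then st.1.set i ((st.1.getD i []).set j "o") else st.1), st.2 + 1))
      (F, c)
    = ((if c ≤ place ∧ place < c + n then
          F.set i ((F.getD i []).set (place - c).toNat "o") else F), c + n) := by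
  induction n with
  | zero => simp
  | succ n ih =>
    rw [List.range_succ, List.foldl_append, ih]
    simp only [List.foldl_cons, List.foldl_nil]
    by_cases h : c ≤ place ∧ place < c + n
    · have h1 : ¬ (c + (n : Int) = place) := by omega
      have h2 : c ≤ place ∧ place < c + (n + 1 : Nat) := by push_cast; push_cast at h; omega
      simp only [if_pos h, if_neg h1, if_pos h2]
      exact Prod.ext rfl (by push_cast; ring)
    · by_cases h3 : c + (n : Int) = place
      · have h4 : c ≤ place ∧ place < c + (n + 1 : Nat) := by push_cast; omega
        have h5 : (place - c).toNat = n := by omega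
        simp only [if_neg h, if_pos h3, if_pos h4, h5]
        exact Prod.ext rfl (by push_cast; ring)
      · have h6 : ¬ (c ≤ place ∧ place < c + (n + 1 : Nat)) := by push_cast; push_cast at h; omega
        simp only [if_neg h, if_neg h3, if_neg h6]
        exact Prod.ext rfl (by push_cast; ring)

-- the outer `for i` loop: place falls in row (place - c).toNat / n, column (place - c).toNat % n
theorem outer_fold (place : Int) (n m : Nat) (F : List (List String)) (c : Int) :
    (List.range m).foldl (fun st i =>
        (List.range n).foldl (fun st j =>
            ((if st.2 = place then st.1.set i ((st.1.getD i []).set j "o") else st.1), st.2 + 1))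
          st)
      (F, c)
    = ((if c ≤ place ∧ place < c + (m * n : Nat) then
          F.set ((place - c).toNat / n)
            ((F.getD ((place - c).toNat / n) []).set ((place - c).toNat % n) "o")
        else F), c + (m * n : Nat)) := by
  induction m with
  | zero => simp
  | succ m ih =>
    rw [List.range_succ, List.foldl_append, ih]
    simp only [List.foldl_cons, List.foldl_nil]
    have hcast : ((m + 1) * n : Nat) = (m * n : Nat) + n := by ring
    by_cases h : c ≤ place ∧ place < c + (m * n : Nat)
    · rw [if_pos h, inner_fold]
      have h1 : ¬ (c + ((m * n : Nat) : Int) ≤ place ∧ place < c + ((m * n : Nat) : Int) + n) := by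
        omega
      have h2 : c ≤ place ∧ place < c + (((m + 1) * n : Nat) : Int) := by
        rw [hcast]; push_cast; push_cast at h; omega
      rw [if_neg h1, if_pos h2]
      exact Prod.ext rfl (by rw [hcast]; push_cast; ring)
    · rw [if_neg h, inner_fold]
      by_cases h3 : c + ((m * n : Nat) : Int) ≤ place ∧ place < c + ((m * n : Nat) : Int) + n
      · have h4 : c ≤ place ∧ place < c + (((m + 1) * n : Nat) : Int) := by
          rw [hcast]; push_cast; push_cast at h3; omega
        set d := (place - c).toNat with hd
        have hb : m * n ≤ d ∧ d < (m + 1) * n := by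
          rw [hcast] at *; omega
        have hdiv : d / n = m := Nat.div_eq_of_lt_le hb.1 hb.2
        have hmod : d % n = d - m * n := by
          have := Nat.div_add_mod d n
          rw [hdiv] at this
          have hc : n * m = m * n := Nat.mul_comm n m
          omega
        have hj : (place - (c + ((m * n : Nat) : Int))).toNat = d % n := by
          rw [hmod]; omega
        rw [if_pos h3, if_pos h4, hdiv, hj]
        exact Prod.ext rfl (by rw [hcast]; push_cast; ring)
      · have h5 : ¬ (c ≤ place ∧ place < c + (((m + 1) * n : Nat) : Int)) := by
          rw [hcast] at *; push_cast at *; omega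
        rw [if_neg h3, if_neg h5]
        exact Prod.ext rfl (by rw [hcast]; push_cast; ring)

-- ===== VERDICT (by name: the statement is the Claim_ definition above) =====
theorem set_point_o_spec : Claim_equal_set_point_o := by
  intro field place _ _
  unfold Spec_set_point_o set_point_o set_point_o_alt
  simp only []
  rw [outer_fold]
  set n := field.length with hn
  by_cases h : (0 : Int) ≤ place ∧ place < 0 + ((n * n : Nat) : Int)
  · have hI : (0 : Int) ≤ place ∧ place < (n : Int) * (n : Int) := by push_cast at h ⊢; omega
    have hpos : 0 < n := by
      by_contra hc
      have : n = 0 := by omega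
      simp [this] at hI; omega
    rw [if_pos h, if_pos hI]
    have hp : place = ((place.toNat : Nat) : Int) := (Int.toNat_of_nonneg hI.1).symm
    have hdiv : (PySem.Int.floordiv place (n : Int)).toNat = (place - 0).toNat / n := by
      rw [hp, PySem.Int.floordiv_natCast]; simp only [Int.toNat_natCast]; congr 1
    have hmod : (PySem.Int.mod place (n : Int)).toNat = (place - 0).toNat % n := by
      rw [hp, PySem.Int.mod_natCast]; simp only [Int.toNat_natCast]; congr 1
    rw [hdiv, hmod]
  · have hI : ¬ ((0 : Int) ≤ place ∧ place < (n : Int) * (n : Int)) := by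
      push_cast at h ⊢; omega
    rw [if_neg h, if_neg hI]
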